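-- pv_equiv track=rewrite | github.com/d14405011-sudo/2026-python | weeks/week-08/solutions/1114405011/10190/q10190.py | build_sequence
-- ===== SOURCE A (Python) =====
-- def build_sequence(n: int, m: int) -> list[int] | None:
--     """回傳合法序列；若不合法回傳 None。"""
--     if n < 1 or m < 2:
--         return None
--
--     seq = [n]
--     while n != 1:
--         if n % m != 0:
--             return None
--         n //= m
--         seq.append(n)
--
--     return seq
-- ===== SOURCE B (Python) =====
-- def build_sequence(n: int, m: int) -> list[int] | None:
--     """Build ascending powers of m up to n, then reverse; None if n is not a power of m."""
--     if n < 1 or m < 2: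
--         return None
--     p = 1
--     seq = [1]
--     while p < n:
--         p *= m
--         seq.append(p)
--     return list(reversed(seq)) if p == n else None
-- ===== Notes on version B (the rewrite author's own statement) =====
-- stated objective: alternative
-- what changed: Instead of repeatedly dividing n by m and appending quotients, B multiplies an accumulator p upward from 1 collecting powers of m, then reverses the list and checks p == n at the end.
import Mathlib
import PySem

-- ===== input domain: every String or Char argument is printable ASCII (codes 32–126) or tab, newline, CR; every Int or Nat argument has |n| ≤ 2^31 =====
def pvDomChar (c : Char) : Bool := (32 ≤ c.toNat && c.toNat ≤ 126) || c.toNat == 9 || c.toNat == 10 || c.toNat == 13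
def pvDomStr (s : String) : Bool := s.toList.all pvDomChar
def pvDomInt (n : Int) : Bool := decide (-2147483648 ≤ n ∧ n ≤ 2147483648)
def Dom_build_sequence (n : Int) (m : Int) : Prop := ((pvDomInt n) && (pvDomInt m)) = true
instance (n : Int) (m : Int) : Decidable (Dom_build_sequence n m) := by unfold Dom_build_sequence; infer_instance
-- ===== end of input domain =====

-- B keeps A's guard but builds the powers of m upward from 1 and reverses at the end,
-- instead of repeatedly dividing n down; same return value everywhere (objective: alternative decomposition).

-- ===== PORT A =====
-- A's while loop: divide n by m, appending, until n = 1; fuel n.toNat+1 bounds the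
-- iteration count (n strictly decreases each step), so fuel is never exhausted on the guarded inputs.
def buildLoopA (m : Int) : Nat → Int → List Int → Option (List Int)
  | 0, _, _ => none
  | fuel+1, n, seq =>
    if n = 1 then some seq
    else if PySem.Int.mod n m ≠ 0 then none
    else buildLoopA m fuel (PySem.Int.floordiv n m) (seq ++ [PySem.Int.floordiv n m])

def build_sequence (n : Int) (m : Int) : Option (List Int) :=
  if n < 1 ∨ m < 2 then none
  else buildLoopA m (n.toNat + 1) n [n]

-- ===== PORT B =====
-- B's while loop: multiply p by m, appending, while p < n; fuel n.toNat+1 bounds the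
-- iteration count (p at least doubles each step from 1).
def buildLoopB (m n : Int) : Nat → Int → List Int → Int × List Int
  | 0, p, seq => (p, seq)
  | fuel+1, p, seq =>
    if p < n then buildLoopB m n fuel (p * m) (seq ++ [p * m]) else (p, seq)

def build_sequence_alt (n : Int) (m : Int) : Option (List Int) :=
  if n < 1 ∨ m < 2 then none
  else
    let r := buildLoopB m n (n.toNat + 1) 1 [1]
    if r.1 = n then some r.2.reverse else none

-- ===== PRECONDITION & SPEC =====
def Spec_build_sequence (n : Int) (m : Int) (out : Option (List Int)) : Prop := out = build_sequence_alt n m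
instance (n : Int) (m : Int) (out : Option (List Int)) : Decidable (Spec_build_sequence n m out) := by unfold Spec_build_sequence; infer_instance

-- ===== CLAIM (what is proved, stated in full; the proofs are below) =====
def Claim_equal_build_sequence : Prop := ∀ (n : Int) (m : Int), Dom_build_sequence n m → Spec_build_sequence n m (build_sequence n m)

-- ===== LEMMAS AND PROOFS =====

-- A's loop on a power of m succeeds, appending the descending tail of smaller powers.
theorem loopA_pow (m : Int) (hm : 2 ≤ m) :
    ∀ (k fuel : Nat) (seq : List Int), k < fuel →
      buildLoopA m fuel (m ^ k) seq
        = some (seq ++ ((List.range k).reverse.map (fun i => m ^ i))) := by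
  intro k
  induction k with
  | zero =>
      intro fuel seq hf
      match fuel, hf with
      | f+1, _ => simp [buildLoopA]
  | succ k ih =>
      intro fuel seq hf
      match fuel, hf with
      | f+1, hf =>
        have hmpos : (0:Int) < m := by omega
        have hne1 : m ^ (k+1) ≠ 1 := by
          have h1 : (2:Int) ^ (k+1) ≤ m ^ (k+1) := pow_le_pow_left₀ (by norm_num) hm _
          have h2 : (2:Int) ≤ 2 ^ (k+1) := by
            calc (2:Int) = 2 ^ 1 := by norm_num
            _ ≤ 2 ^ (k+1) := pow_le_pow_right₀ (by norm_num) (by omega)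
          omega
        have hmodz : PySem.Int.mod (m ^ (k+1)) m = 0 := by
          rw [PySem.Int.mod_eq_emod_of_pos hmpos, pow_succ]
          exact Int.mul_emod_left _ _
        have hdiv : PySem.Int.floordiv (m ^ (k+1)) m = m ^ k := by
          rw [PySem.Int.floordiv_eq_ediv_of_pos hmpos, pow_succ]
          exact Int.mul_ediv_cancel _ (by omega)
        rw [buildLoopA, if_neg hne1, if_neg (by simp [hmodz]), hdiv,
            ih f (seq ++ [m ^ k]) (by omega)]
        simp [List.range_succ]

-- A's loop on an n ≥ 1 that is no power of m returns none.
theorem loopA_notpow (m : Int) (hm : 2 ≤ m) :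
    ∀ (fuel : Nat) (n : Int) (seq : List Int), 1 ≤ n → n.toNat < fuel →
      (∀ k : Nat, n ≠ m ^ k) → buildLoopA m fuel n seq = none := by
  intro fuel
  induction fuel with
  | zero => intro n seq _ hf _; omega
  | succ f ih =>
      intro n seq hn hf hnp
      have hne1 : n ≠ 1 := by
        intro h; exact hnp 0 (by simp [h])
      rw [buildLoopA, if_neg hne1]
      by_cases hmod : PySem.Int.mod n m = 0
      · rw [if_neg (by simp [hmod])]
        have hmpos : (0:Int) < m := by omega
        have hdvd : m ∣ n := by
          have h := PySem.Int.mod_eq_emod_of_pos hmpos (a := n)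
          exact Int.dvd_of_emod_eq_zero (by omega)
        obtain ⟨c, hc⟩ := hdvd
        have hdiv : PySem.Int.floordiv n m = c := by
          rw [PySem.Int.floordiv_eq_ediv_of_pos hmpos, hc]
          exact Int.mul_ediv_cancel_left _ (by omega)
        have hc1 : 1 ≤ c := by nlinarith
        have hclt : c < n := by nlinarith
        rw [hdiv]
        apply ih _ _ hc1 (by omega)
        intro k hk
        exact hnp (k+1) (by rw [hc, hk, pow_succ'])
      · rw [if_pos (by simp [hmod])]

-- B's loop starting at p = m^j reaches the least power of m that is ≥ n,
-- carrying the full ascending list of powers.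
theorem loopB_char (m n : Int) (hm : 2 ≤ m) :
    ∀ (fuel j : Nat), n ≤ m ^ j * 2 ^ fuel → (∀ i, i < j → m ^ i < n) →
      ∃ K : Nat,
        buildLoopB m n fuel (m ^ j) ((List.range (j+1)).map (fun i => m ^ i))
          = (m ^ K, (List.range (K+1)).map (fun i => m ^ i))
        ∧ n ≤ m ^ K ∧ (∀ i, i < K → m ^ i < n) := by
  intro fuel
  induction fuel with
  | zero =>
      intro j hb hinv
      refine ⟨j, rfl, ?_, hinv⟩
      simpa using hb
  | succ f ih =>
      intro j hb hinv
      by_cases hlt : m ^ j < n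
      · have hpow_pos : (0:Int) < m ^ j := pow_pos (by omega) _
        have hb' : n ≤ m ^ (j+1) * 2 ^ f := by
          have : m ^ j * 2 ≤ m ^ (j+1) := by
            rw [pow_succ]; nlinarith
          have h2f : (0:Int) < 2 ^ f := by positivity
          calc n ≤ m ^ j * 2 ^ (f+1) := hb
            _ = (m ^ j * 2) * 2 ^ f := by ring
            _ ≤ m ^ (j+1) * 2 ^ f := by nlinarith
        have hinv' : ∀ i, i < j + 1 → m ^ i < n := by
          intro i hi
          rcases Nat.lt_succ_iff_lt_or_eq.mp hi with h | h
          · exact hinv i h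
          · simpa [h] using hlt
        obtain ⟨K, hK, hKge, hKmin⟩ := ih (j+1) hb' hinv'
        refine ⟨K, ?_, hKge, hKmin⟩
        rw [buildLoopB, if_pos hlt, ← pow_succ]
        have hl : ((List.range (j+1)).map (fun i => m ^ i)) ++ [m ^ (j+1)]
            = (List.range (j+2)).map (fun i => m ^ i) := by
          simp [List.range_succ]
        rw [hl]; exact hK
      · exact ⟨j, by rw [buildLoopB, if_neg hlt], by omega, hinv⟩

theorem le_two_pow_toNat (n : Int) (hn : 1 ≤ n) : n ≤ 2 ^ (n.toNat + 1) := by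
  have h := Nat.lt_two_pow_self (n := n.toNat)
  have : (n.toNat : Int) < (2:Int) ^ n.toNat := by exact_mod_cast h
  have h2 : (2:Int) ^ n.toNat ≤ 2 ^ (n.toNat + 1) := by
    have : (0:Int) < 2 ^ n.toNat := by positivity
    rw [pow_succ]; omega
  omega

-- ===== VERDICT (by name: the statement is the Claim_ definition above) =====
theorem build_sequence_spec : Claim_equal_build_sequence := by
  intro n m _
  unfold Spec_build_sequence
  by_cases hg : n < 1 ∨ m < 2
  · unfold build_sequence build_sequence_alt
    rw [if_pos hg, if_pos hg]
  · push_neg at hg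
    obtain ⟨hn, hm⟩ := hg
    have hb0 : n ≤ m ^ 0 * 2 ^ (n.toNat + 1) := by
      simpa using le_two_pow_toNat n hn
    obtain ⟨K, hK, hKge, hKmin⟩ := loopB_char m n hm (n.toNat + 1) 0 hb0 (by omega)
    rw [show ((List.range (0+1)).map (fun i => m ^ i)) = [1] from by simp, pow_zero] at hK
    rw [build_sequence, build_sequence_alt, if_neg (by omega), if_neg (by omega)]
    simp only [hK]
    by_cases hpow : ∃ k : Nat, n = m ^ k
    · obtain ⟨k, hk⟩ := hpow
      have hKk : K = k := by
        rcases Nat.lt_trichotomy K k with h | h | h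
        · exact absurd (hk ▸ hKge) (not_le.mpr (pow_lt_pow_right₀ (by omega) h))
        · exact h
        · exact absurd (hKmin k h) (by rw [hk]; exact lt_irrefl _)
      subst hKk
      have hkpow : (K : Int) < m ^ K := by
        have h1 : (2:Int) ^ K ≤ m ^ K := pow_le_pow_left₀ (by norm_num) hm _
        have h2 : (K : Int) < (2:Int) ^ K := by
          exact_mod_cast Nat.lt_two_pow_self (n := K)
        omega
      have hkfuel : K < (m ^ K).toNat + 1 := by omega
      rw [if_pos hk.symm, hk, loopA_pow m hm K ((m ^ K).toNat + 1) [m ^ K] hkfuel]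
      simp [List.range_succ, List.map_reverse]
    · push_neg at hpow
      rw [loopA_notpow m hm (n.toNat + 1) n [n] hn (by omega) hpow,
          if_neg (fun h => hpow K h.symm)]
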